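-- pv_equiv track=rewrite | github.com/DaniiarS/algoprog-algorithms | 2v/add5/power.py | min_divisor
-- ===== SOURCE A (Python) =====
-- def factorize(num:int) -> dict:
--     if num == 1:
--         return {1:1}
--
--     k = 2
--     factors = dict()
--
--     while k <= num / k:
--         if num % k == 0:
--             if k not in factors:
--                 factors[k] = 1
--             else:
--                 factors[k] += 1
--             num //= k
--             continue
--         k += 1
--
--     if num > 1:
--         if num in factors:
--             factors[num] += 1
--         else:
--             factors[num] = 1
--
--     return factors
--
-- def min_divisor(num:int) -> int:
--     N = 1
--     A_divisors = factorize(num)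
--
--     min_divisor = 1
--     for i in range(1, num + 1):
--         N_divisors = factorize(i)
--         found = False
--
--         for A_base, A_exponent in A_divisors.items():
--             if A_base in N_divisors.keys():
--                 if N_divisors[A_base] * i >= A_exponent:
--                     found = True
--                 else:
--                     found = False
--                     break
--             else:
--                 found = False
--                 break
--
--         if found:
--             min_divisor = i
--             return min_divisor
-- ===== SOURCE B (Python) =====
-- def min_divisor(num: int) -> int:
--     if num == 1:
--         return 1
--     # factorize num once by trial division, stripping each factor fully
--     factors = {}
--     n = num
--     k = 2
--     while k * k <= n:
--         while n % k == 0: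
--             factors[k] = factors.get(k, 0) + 1
--             n //= k
--         k += 1
--     if n > 1:
--         factors[n] = factors.get(n, 0) + 1
--     # any candidate must be divisible by every prime of num, i.e. by the radical
--     radical = 1
--     for p in factors:
--         radical *= p
--     # test only multiples of the radical
--     for i in range(radical, num + 1, radical):
--         ok = True
--         for p, e in factors.items():
--             m = 0
--             t = i
--             while t % p == 0:
--                 m += 1
--                 t //= p
--             if m * i < e:
--                 ok = False
--                 break
--         if ok:
--             return i
-- ===== Notes on version B (the rewrite author's own statement) =====
-- stated objective: faster
-- what changed: B factorizes num once, forms the radical (product of its distinct primes) and tests only multiples of the radical using direct p-adic valuations, instead of running full trial-division factorization of every candidate i = 1..num as A does.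
-- outside the precondition, e.g. on min_divisor(0): A returns None, B returns None; on min_divisor(-7): A returns None, B returns None
import Mathlib
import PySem

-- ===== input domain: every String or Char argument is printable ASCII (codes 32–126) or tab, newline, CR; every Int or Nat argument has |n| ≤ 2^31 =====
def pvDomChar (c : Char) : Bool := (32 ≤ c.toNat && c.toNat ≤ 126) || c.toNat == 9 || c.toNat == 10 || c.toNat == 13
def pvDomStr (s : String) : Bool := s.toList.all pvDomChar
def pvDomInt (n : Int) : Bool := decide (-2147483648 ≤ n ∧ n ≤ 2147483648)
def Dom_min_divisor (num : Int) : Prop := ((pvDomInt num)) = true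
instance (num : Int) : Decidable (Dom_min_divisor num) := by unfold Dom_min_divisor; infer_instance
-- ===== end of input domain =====

-- B factorizes num ONCE, forms the radical (product of its distinct primes) and tests only
-- multiples of the radical with direct p-adic valuations, instead of fully factorizing every
-- candidate i = 1, 2, 3, … as A does.

-- ===== PORT A =====
-- Python: "if k not in factors: factors[k] = 1 else: factors[k] += 1"
def pvBumpA (f : PySem.Dict Int Int) (k : Int) : PySem.Dict Int Int :=
  if f.contains k = false then f.insert k 1 else f.insert k (f.getD k 0 + 1)

-- fuel for A's while loop: an upper bound on its number of iterations (each iteration either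
-- divides num down or increments k, both decrease this measure); the fuel only makes the
-- structural recursion total, it never changes the computed value on the admitted inputs
def pvFuelA (n k : Int) : Nat := 2 * n.toNat + (n + 1 - k).toNat + 1

-- Python: "while k <= num / k: …".  The guard `k <= num / k` (true division) is exact float
-- arithmetic on the admitted domain (2 ≤ k, |num| ≤ 2^31 < 2^53) and equals k*k ≤ num there.
def pvLoopA : Nat → Int → Int → PySem.Dict Int Int → Int × PySem.Dict Int Int
  | 0, n, _, f => (n, f)
  | fuel+1, n, k, f =>
    if k * k ≤ n then
      if PySem.Int.mod n k == 0 then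
        pvLoopA fuel (PySem.Int.floordiv n k) k (pvBumpA f k)
      else
        pvLoopA fuel n (k+1) f
    else (n, f)

-- Python: "if num > 1: (insert/bump num)"
def pvTrailA (r : Int × PySem.Dict Int Int) : PySem.Dict Int Int :=
  if r.1 > 1 then
    (if r.2.contains r.1 then r.2.insert r.1 (r.2.getD r.1 0 + 1) else r.2.insert r.1 1)
  else r.2

def factorizeA (num : Int) : PySem.Dict Int Int :=
  if num == 1 then (PySem.Dict.empty).insert 1 1
  else pvTrailA (pvLoopA (pvFuelA num 2) num 2 PySem.Dict.empty)

-- the inner "for A_base, A_exponent in A_divisors.items()" loop with its `found` flag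
def pvCheckA (i : Int) (nd : PySem.Dict Int Int) : List (Int × Int) → Bool → Bool
  | [], found => found
  | (p, e) :: rest, _ =>
    match nd.get? p with
    | some m => if m * i ≥ e then pvCheckA i nd rest true else false
    | none => false

-- the outer "for i in range(1, num + 1)" loop, iterated lazily exactly as Python's range
-- object yields its elements (i, then i+1, while i < stop); the Nat fuel — one unit per
-- yielded element, more than enough — only makes the recursion structural.  When the range
-- is exhausted Python falls off the function and returns None (only reachable for num ≤ 0,
-- excluded by Pre_); ported as 0
def pvSearchA (ad : PySem.Dict Int Int) : Nat → Int → Int → Int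
  | 0, _, _ => 0
  | fuel+1, i, stop =>
    if i < stop then
      (if pvCheckA i (factorizeA i) ad.items false then i else pvSearchA ad fuel (i+1) stop)
    else 0

def min_divisor (num : Int) : Int :=
  pvSearchA (factorizeA num) (num + 1).toNat 1 (num + 1)

-- ===== PORT B =====
-- inner "while n % k == 0" of Source B's factorization (fuel only for totality)
def pvDivLoopB : Nat → Int → Int → PySem.Dict Int Int → Int × PySem.Dict Int Int
  | 0, n, _, f => (n, f)
  | fuel+1, n, k, f =>
    if PySem.Int.mod n k == 0 then
      pvDivLoopB fuel (PySem.Int.floordiv n k) k (f.insert k (f.getD k 0 + 1))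
    else (n, f)

-- outer "while k * k <= n" of Source B's factorization
def pvFactB : Nat → Int → Int → PySem.Dict Int Int → Int × PySem.Dict Int Int
  | 0, n, _, f => (n, f)
  | fuel+1, n, k, f =>
    if k * k ≤ n then
      let r := pvDivLoopB n.toNat n k f
      pvFactB fuel r.1 (k+1) r.2
    else (n, f)

-- Python: "if n > 1: factors[n] = factors.get(n, 0) + 1"
def pvTrailB (r : Int × PySem.Dict Int Int) : PySem.Dict Int Int :=
  if r.1 > 1 then r.2.insert r.1 (r.2.getD r.1 0 + 1) else r.2

-- "m = 0; t = i; while t % p == 0: m += 1; t //= p" — returns m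
def pvValB : Nat → Int → Int → Int
  | 0, _, _ => 0
  | fuel+1, t, p =>
    if PySem.Int.mod t p == 0 then pvValB fuel (PySem.Int.floordiv t p) p + 1 else 0

-- "for p, e in factors.items(): … if m * i < e: ok = False; break"
def pvCheckB (i : Int) : List (Int × Int) → Bool
  | [] => true
  | (p, e) :: rest => if pvValB i.toNat i p * i < e then false else pvCheckB i rest

-- "for i in range(radical, num + 1, radical)", iterated lazily like Python's range object
-- (yield i while i < stop, then i + step); fuel only for structural recursion; a fallen-off
-- loop (None, num ≤ 0 only) is ported as 0
def pvSearchB (items : List (Int × Int)) (step : Int) : Nat → Int → Int → Int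
  | 0, _, _ => 0
  | fuel+1, i, stop =>
    if i < stop then
      (if pvCheckB i items then i else pvSearchB items step fuel (i + step) stop)
    else 0

def min_divisor_alt (num : Int) : Int :=
  if num == 1 then 1
  else
    let f := pvTrailB (pvFactB (num + 1 - 2).toNat num 2 PySem.Dict.empty)
    let radical := f.keys.foldl (fun acc p => acc * p) 1
    pvSearchB f.items radical (num + 1).toNat radical (num + 1)

-- ===== PRECONDITION & SPEC =====
-- Pre_ excludes num ≤ 0: there both Pythons fall off their search loop and return None,
-- which is not a value of the declared int return type.
def Pre_min_divisor (num : Int) : Prop := 1 ≤ num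
instance (num : Int) : Decidable (Pre_min_divisor num) := by unfold Pre_min_divisor; infer_instance
def pvWitness_min_divisor : Int := (12)

def Spec_min_divisor (num : Int) (out : Int) : Prop := out = min_divisor_alt num
instance (num : Int) (out : Int) : Decidable (Spec_min_divisor num out) := by unfold Spec_min_divisor; infer_instance

-- ===== CLAIM (what is proved, stated in full; the proofs are below) =====
def Claim_equal_min_divisor : Prop := ∀ (num : Int), Dom_min_divisor num → Pre_min_divisor num → Spec_min_divisor num (min_divisor num)

-- ===== LEMMAS AND PROOFS =====

-- the (Nat) prime-factorization exponent, as an Int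
def pvFz (n p : Int) : Int := ((n.toNat.factorization p.toNat : Nat) : Int)

theorem pv_dvd_toNat {p n : Int} (hp : 0 ≤ p) (hn : 0 ≤ n) : p ∣ n ↔ p.toNat ∣ n.toNat := by
  rw [← Int.natCast_dvd_natCast, Int.toNat_of_nonneg hp, Int.toNat_of_nonneg hn]

-- n has no divisor in [2,k) and n < k²  ⇒  n prime
theorem pv_S1 {n k : Int} (hk : 2 ≤ k) (hn : 2 ≤ n) (hnk : n < k * k)
    (inv : ∀ j : Int, 2 ≤ j → j < k → ¬ j ∣ n) : n.toNat.Prime := by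
  by_contra hnp
  have hqp : n.toNat.minFac.Prime := Nat.minFac_prime (by omega)
  have hqd : n.toNat.minFac ∣ n.toNat := Nat.minFac_dvd _
  have hsq : n.toNat.minFac ^ 2 ≤ n.toNat := Nat.minFac_sq_le_self (by omega) hnp
  have hq2 : 2 ≤ n.toNat.minFac := hqp.two_le
  have hqdInt : (n.toNat.minFac : Int) ∣ n := by
    rw [pv_dvd_toNat (by positivity) (by omega)]; simpa using hqd
  by_cases hlt : (n.toNat.minFac : Int) < k
  · exact inv _ (by exact_mod_cast hq2) hlt hqdInt
  · push Not at hlt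
    have h1 : k * k ≤ (n.toNat.minFac : Int) * (n.toNat.minFac : Int) :=
      mul_le_mul hlt hlt (by omega) (by positivity)
    have h2 : (n.toNat.minFac : Int) * (n.toNat.minFac : Int) ≤ n := by
      have := hsq; push_cast [pow_two] at this ⊢; omega
    omega

-- k ∣ n and n has no divisor in [2,k)  ⇒  k prime
theorem pv_S2 {n k : Int} (hk : 2 ≤ k) (_hn : 1 ≤ n) (hdvd : k ∣ n)
    (inv : ∀ j : Int, 2 ≤ j → j < k → ¬ j ∣ n) : k.toNat.Prime := by
  have hqp : k.toNat.minFac.Prime := Nat.minFac_prime (by omega)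
  have hqd : k.toNat.minFac ∣ k.toNat := Nat.minFac_dvd _
  have hq2 : 2 ≤ k.toNat.minFac := hqp.two_le
  have hqk : (k.toNat.minFac : Int) ∣ k := by
    rw [pv_dvd_toNat (by positivity) (by omega)]; simpa using hqd
  have hqn : (k.toNat.minFac : Int) ∣ n := hqk.trans hdvd
  by_cases hlt : (k.toNat.minFac : Int) < k
  · exact absurd hqn (inv _ (by exact_mod_cast hq2) hlt)
  · push Not at hlt
    have hle : k.toNat.minFac ≤ k.toNat := Nat.minFac_le (by omega)
    have : k.toNat.minFac = k.toNat := by omega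
    rwa [← this]

-- pvValB computes the p-adic valuation
theorem pv_val_eq_fz : ∀ (fuel : Nat) (t p : Int), 1 ≤ t → 2 ≤ p → t.toNat ≤ fuel →
    p.toNat.Prime → pvValB fuel t p = pvFz t p := by
  intro fuel
  induction fuel with
  | zero => intro t p ht hp hf _; omega
  | succ fuel ih =>
    intro t p ht hp hf hpp
    rw [pvValB]
    by_cases hd : p ∣ t
    · have hmod : (PySem.Int.mod t p == 0) = true := by
        simp [PySem.Int.mod_eq_zero_iff_dvd, hd]
      rw [if_pos hmod, PySem.Int.floordiv_eq_ediv_of_pos (by omega)]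
      have heq : (t / p) * p = t := Int.ediv_mul_cancel hd
      have ht' : 1 ≤ t / p := by nlinarith [Int.le_of_lt (show (0:Int) < t/p by nlinarith)]
      have hlt : t / p < t := by nlinarith
      rw [ih (t / p) p ht' hp (by omega) hpp]
      -- pvFz t p = pvFz (t/p) p + 1
      have hNat : t.toNat = p.toNat * (t / p).toNat := by
        have : ((p.toNat * (t / p).toNat : Nat) : Int) = t := by
          push_cast [Int.toNat_of_nonneg (show (0:Int) ≤ p by omega),
            Int.toNat_of_nonneg (show (0:Int) ≤ t / p by omega)]
          nlinarith
        omega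
      have hfz : t.toNat.factorization p.toNat
          = (t / p).toNat.factorization p.toNat + 1 := by
        rw [hNat, Nat.factorization_mul (by omega) (by omega)]
        simp [hpp.factorization_self, Nat.add_comm]
      simp only [pvFz, hfz]; push_cast; ring
    · have hmod : (PySem.Int.mod t p == 0) = false := by
        simp [PySem.Int.mod_eq_zero_iff_dvd, hd]
      rw [if_neg (by simp [hmod])]
      have : ¬ p.toNat ∣ t.toNat := by
        rw [← pv_dvd_toNat (by omega) (by omega)]; exact hd
      simp [pvFz, Nat.factorization_eq_zero_of_not_dvd this]

-- ============ arithmetic facts about pvFz ============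

theorem pv_toNat_mul {n n' k : Int} (hk : 0 ≤ k) (hn' : 0 ≤ n') (heq : n' * k = n) :
    n.toNat = k.toNat * n'.toNat := by
  have : ((k.toNat * n'.toNat : Nat) : Int) = n := by
    push_cast [Int.toNat_of_nonneg hk, Int.toNat_of_nonneg hn']
    nlinarith
  omega

theorem pv_fz_step {n n' k : Int} (hk2 : 2 ≤ k) (hkp : k.toNat.Prime) (hn' : 1 ≤ n')
    (heq : n' * k = n) : pvFz n k = pvFz n' k + 1 := by
  have h := pv_toNat_mul (by omega) (by omega) heq
  have : n.toNat.factorization k.toNat = n'.toNat.factorization k.toNat + 1 := by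
    rw [h, Nat.factorization_mul (by omega) (by omega)]
    simp [hkp.factorization_self, Nat.add_comm]
  simp only [pvFz, this]; push_cast; ring

theorem pv_fz_other {n n' k p : Int} (hk2 : 2 ≤ k) (hkp : k.toNat.Prime) (hn' : 1 ≤ n')
    (heq : n' * k = n) (hp2 : 2 ≤ p) (hpk : p ≠ k) : pvFz n p = pvFz n' p := by
  have h := pv_toNat_mul (by omega) (by omega) heq
  have hne : p.toNat ≠ k.toNat := by omega
  have : n.toNat.factorization p.toNat = n'.toNat.factorization p.toNat := by
    rw [h, Nat.factorization_mul (by omega) (by omega)]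
    simp [hkp.factorization, (Ne.symm hne)]
  simp only [pvFz, this]

theorem pv_fz_pos_iff {n p : Int} (hn : 1 ≤ n) (hp2 : 2 ≤ p) (hpp : p.toNat.Prime) :
    p ∣ n ↔ 1 ≤ pvFz n p := by
  rw [pv_dvd_toNat (by omega) (by omega),
    hpp.dvd_iff_one_le_factorization (by omega)]
  simp only [pvFz]
  omega

theorem pv_fz_zero_of_not_dvd {n p : Int} (hn : 0 ≤ n) (hp : 0 ≤ p) (h : ¬ p ∣ n) :
    pvFz n p = 0 := by
  rw [pv_dvd_toNat hp hn] at h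
  simp [pvFz, Nat.factorization_eq_zero_of_not_dvd h]

theorem pv_fz_self {n : Int} (_hn : 2 ≤ n) (hp : n.toNat.Prime) : pvFz n n = 1 := by
  simp [pvFz, hp.factorization_self]

-- ============ characterization of the two factorization loops ============

def pvGoodDict (n : Int) (f d : PySem.Dict Int Int) : Prop :=
  d.keys.Nodup ∧ ∀ p : Int, d.get? p =
    if p ∈ f.keys ∨ (2 ≤ p ∧ p.toNat.Prime ∧ p ∣ n) then some (f.getD p 0 + pvFz n p) else none

theorem pv_trailA_eq_trailB (r : Int × PySem.Dict Int Int) : pvTrailA r = pvTrailB r := by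
  rw [pvTrailA, pvTrailB]
  by_cases h : r.2.contains r.1
  · rw [if_pos h]
  · rw [if_neg h, PySem.Dict.getD_of_not_contains _ _ (by simpa using h)]
    norm_num

theorem pv_bumpA_get? (f : PySem.Dict Int Int) (k p : Int) :
    (pvBumpA f k).get? p = if p = k then some (f.getD k 0 + 1) else f.get? p := by
  rw [pvBumpA]
  by_cases h : f.contains k
  · rw [if_neg (by simp [h]), PySem.Dict.get?_insert]
  · rw [if_pos (by simp [h]), PySem.Dict.get?_insert,
      PySem.Dict.getD_of_not_contains _ _ (by simpa using h)]
    norm_num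

theorem pv_bumpA_nodup (f : PySem.Dict Int Int) (k : Int) (h : f.keys.Nodup) :
    (pvBumpA f k).keys.Nodup := by
  rw [pvBumpA]
  split <;> exact PySem.Dict.nodup_keys_insert _ _ _ h

theorem pv_mem_keys_iff_get? {f : PySem.Dict Int Int} {p : Int} :
    p ∈ f.keys ↔ f.get? p ≠ none := by
  constructor
  · intro h hn; exact (PySem.Dict.get?_eq_none_iff_not_mem_keys _ _).mp hn h
  · intro h; by_contra hc; exact h ((PySem.Dict.get?_eq_none_iff_not_mem_keys _ _).mpr hc)

-- shared base case: the loop has ended (n < k²), only the trailing insert remains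
theorem pv_char_base {n k : Int} {f : PySem.Dict Int Int} (hk : 2 ≤ k) (hn : 1 ≤ n)
    (hnk : n < k * k)
    (inv : ∀ j : Int, 2 ≤ j → j < k → ¬ j ∣ n)
    (hkeys : ∀ q ∈ f.keys, 2 ≤ q ∧ q ≤ k) (hnd : f.keys.Nodup) :
    pvGoodDict n f (pvTrailB (n, f)) := by
  rw [pvTrailB]
  by_cases hn1 : (1:Int) < n
  · rw [if_pos (by exact hn1)]
    have hprime : n.toNat.Prime := pv_S1 hk (by omega) hnk inv
    -- any p ≠ n with p ≥ 2 in f.keys does not divide n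
    have hnodvd : ∀ p : Int, p ∈ f.keys → p ≠ n → ¬ p ∣ n := by
      intro p hp hne hdvd
      obtain ⟨hp2, hpk⟩ := hkeys p hp
      rcases lt_or_eq_of_le hpk with hlt | rfl
      · exact inv p hp2 hlt hdvd
      · have : p.toNat ∣ n.toNat := (pv_dvd_toNat (by omega) (by omega)).mp hdvd
        rcases (Nat.Prime.eq_one_or_self_of_dvd hprime _ this) with h1 | hs
        · omega
        · omega
    refine ⟨PySem.Dict.nodup_keys_insert _ _ _ hnd, ?_⟩
    intro p
    rw [PySem.Dict.get?_insert]
    by_cases hpn : p = n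
    · subst hpn
      rw [if_pos rfl, if_pos (.inr ⟨by omega, hprime, dvd_refl p⟩), pv_fz_self (by omega) hprime]
    · rw [if_neg hpn]
      have hcond : ¬ (2 ≤ p ∧ p.toNat.Prime ∧ p ∣ n) := by
        rintro ⟨hp2, hpp, hpd⟩
        have : p.toNat ∣ n.toNat := (pv_dvd_toNat (by omega) (by omega)).mp hpd
        rcases (Nat.Prime.eq_one_or_self_of_dvd hprime _ this) with h1 | hs
        · omega
        · exact hpn (by omega)
      by_cases hmem : p ∈ f.keys
      · rw [if_pos (.inl hmem)]
        have hfz : pvFz n p = 0 := by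
          by_cases hdvd : p ∣ n
          · exact absurd hdvd (hnodvd p hmem hpn)
          · exact pv_fz_zero_of_not_dvd (by omega) (by have := (hkeys p hmem).1; omega) hdvd
        cases hc : f.get? p with
        | none => exact absurd ((PySem.Dict.get?_eq_none_iff_not_mem_keys _ _).mp hc) (by simp [hmem])
        | some v =>
          rw [hfz, PySem.Dict.getD_eq_get?_getD, hc]
          norm_num
      · rw [if_neg (by simp [hmem, hcond]), (PySem.Dict.get?_eq_none_iff_not_mem_keys _ _).mpr hmem]
  · rw [if_neg (by exact hn1)]
    have hne : n = 1 := by omega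
    subst hne
    refine ⟨hnd, ?_⟩
    intro p
    have hcond : ¬ (2 ≤ p ∧ p.toNat.Prime ∧ p ∣ 1) := by
      rintro ⟨hp2, -, hpd⟩
      have := Int.le_of_dvd (by norm_num) hpd
      omega
    by_cases hmem : p ∈ f.keys
    · rw [if_pos (.inl hmem)]
      cases hc : f.get? p with
      | none => exact absurd ((PySem.Dict.get?_eq_none_iff_not_mem_keys _ _).mp hc) (by simp [hmem])
      | some v =>
        rw [PySem.Dict.getD_eq_get?_getD, hc]
        simp [pvFz]
    · rw [if_neg (by simp [hmem, hcond]), (PySem.Dict.get?_eq_none_iff_not_mem_keys _ _).mpr hmem]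

theorem pv_charA : ∀ (fuel : Nat) (n k : Int) (f : PySem.Dict Int Int),
    2 ≤ k → 1 ≤ n → pvFuelA n k ≤ fuel →
    (∀ j : Int, 2 ≤ j → j < k → ¬ j ∣ n) →
    (∀ q ∈ f.keys, 2 ≤ q ∧ q ≤ k) → f.keys.Nodup →
    pvGoodDict n f (pvTrailA (pvLoopA fuel n k f)) := by
  intro fuel
  induction fuel with
  | zero => intro n k f hk hn hf inv hkeys hnd; simp [pvFuelA] at hf
  | succ fuel ih =>
    intro n k f hk hn hf inv hkeys hnd
    rw [pvLoopA]
    by_cases hguard : k * k ≤ n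
    swap
    · rw [if_neg hguard, pv_trailA_eq_trailB]
      exact pv_char_base hk hn (by omega) inv hkeys hnd
    rw [if_pos hguard]
    have hkn : k ≤ n := by nlinarith
    have hn4 : 4 ≤ n := by nlinarith
    by_cases hd : k ∣ n
    · rw [if_pos (by simp [PySem.Int.mod_eq_zero_iff_dvd, hd]),
        PySem.Int.floordiv_eq_ediv_of_pos (show (0:Int) < k by omega)]
      have hkp : k.toNat.Prime := pv_S2 hk hn hd inv
      have heq : (n / k) * k = n := Int.ediv_mul_cancel hd
      have hn' : 1 ≤ n / k := by nlinarith [Int.le_of_lt (show (0:Int) < n/k by nlinarith)]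
      have hlt : n / k < n := by nlinarith
      have hNat := pv_toNat_mul (show (0:Int) ≤ k by omega) (by omega) heq
      have h2M : 2 * (n / k).toNat ≤ n.toNat := by
        calc 2 * (n / k).toNat ≤ k.toNat * (n / k).toNat :=
              Nat.mul_le_mul_right _ (by omega)
          _ = n.toNat := hNat.symm
      obtain ⟨j1, j2⟩ := ih (n / k) k (pvBumpA f k) hk hn'
        (by simp only [pvFuelA] at hf ⊢; omega)
        (fun j hj2 hjk hjd => inv j hj2 hjk (hjd.trans (Dvd.intro k (by linarith [heq]))))
        (by
          intro q hq
          rw [pvBumpA] at hq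
          rcases (by
            split at hq <;>
              exact (PySem.Dict.mem_keys_insert _ _ _ _).mp hq) with rfl | hq'
          · exact ⟨hk, le_refl q⟩
          · exact hkeys q hq')
        (pv_bumpA_nodup f k hnd)
      refine ⟨j1, ?_⟩
      intro p
      rw [j2 p]
      have hbmem : ∀ q : Int, q ∈ (pvBumpA f k).keys ↔ (q = k ∨ q ∈ f.keys) := by
        intro q
        rw [pvBumpA]; split <;> exact PySem.Dict.mem_keys_insert _ _ _ _
      by_cases hpk : p = k
      · subst hpk
        rw [if_pos (.inl ((hbmem p).mpr (.inl rfl))), if_pos (.inr ⟨hk, hkp, hd⟩),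
          PySem.Dict.getD_eq_get?_getD, pv_bumpA_get?, if_pos rfl]
        have hstep := pv_fz_step hk hkp hn' heq
        simp only [Option.getD_some]
        rw [show pvFz n p = pvFz (n / p) p + 1 from hstep]
        ring_nf
      · have hgD : (pvBumpA f k).getD p 0 = f.getD p 0 := by
          rw [PySem.Dict.getD_eq_get?_getD, pv_bumpA_get?, if_neg hpk,
            ← PySem.Dict.getD_eq_get?_getD]
        have hfzo : 2 ≤ p → pvFz (n / k) p = pvFz n p := fun hp2 =>
          (pv_fz_other hk hkp hn' heq hp2 hpk).symm
        have hdvdo : 2 ≤ p → p.toNat.Prime → (p ∣ n / k ↔ p ∣ n) := by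
          intro hp2 hpp
          rw [pv_fz_pos_iff hn' hp2 hpp, pv_fz_pos_iff hn hp2 hpp, hfzo hp2]
        by_cases hcond : p ∈ f.keys ∨ (2 ≤ p ∧ p.toNat.Prime ∧ p ∣ n)
        · have hp2 : 2 ≤ p := by
            rcases hcond with hmem | ⟨hp2, -, -⟩
            · exact (hkeys p hmem).1
            · exact hp2
          rw [if_pos (by
              rcases hcond with hmem | ⟨hp2', hpp, hpd⟩
              · exact .inl ((hbmem p).mpr (.inr hmem))
              · exact .inr ⟨hp2', hpp, (hdvdo hp2' hpp).mpr hpd⟩),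
            if_pos hcond, hgD, hfzo hp2]
        · rw [if_neg (by
              rintro (hmem | ⟨hp2', hpp, hpd⟩)
              · rcases (hbmem p).mp hmem with rfl | hm'
                · exact hpk rfl
                · exact hcond (.inl hm')
              · exact hcond (.inr ⟨hp2', hpp,
                  hpd.trans (Dvd.intro k (by linarith [heq]))⟩)),
            if_neg hcond]
    · rw [if_neg (by simp [PySem.Int.mod_eq_zero_iff_dvd, hd])]
      exact ih n (k+1) f (by omega) hn
        (by simp only [pvFuelA] at hf ⊢; omega)
        (by
          intro j hj2 hjk
          rcases lt_or_eq_of_le (show j ≤ k by omega) with hlt | rfl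
          · exact inv j hj2 hlt
          · exact hd)
        (fun q hq => ⟨(hkeys q hq).1, by have := (hkeys q hq).2; omega⟩) hnd

theorem pv_charDivB : ∀ (fuel : Nat) (n k : Int) (f : PySem.Dict Int Int),
    2 ≤ k → 1 ≤ n → n.toNat ≤ fuel → k.toNat.Prime →
    (1 ≤ (pvDivLoopB fuel n k f).1) ∧
    ((pvDivLoopB fuel n k f).1.toNat = n.toNat / k.toNat ^ (n.toNat.factorization k.toNat)) ∧
    (f.keys.Nodup → (pvDivLoopB fuel n k f).2.keys.Nodup) ∧
    (∀ q ∈ (pvDivLoopB fuel n k f).2.keys, q ∈ f.keys ∨ q = k) ∧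
    (∀ p : Int, (pvDivLoopB fuel n k f).2.get? p =
      if p = k ∧ k ∣ n then some (f.getD k 0 + pvFz n k) else f.get? p) := by
  intro fuel
  induction fuel with
  | zero => intro n k f hk hn hf _; omega
  | succ fuel ih =>
    intro n k f hk hn hf hkp
    rw [pvDivLoopB]
    by_cases hd : k ∣ n
    · rw [if_pos (by simp [PySem.Int.mod_eq_zero_iff_dvd, hd]),
        PySem.Int.floordiv_eq_ediv_of_pos (show (0:Int) < k by omega)]
      have heq : (n / k) * k = n := Int.ediv_mul_cancel hd
      have hn' : 1 ≤ n / k := by nlinarith [Int.le_of_lt (show (0:Int) < n/k by nlinarith)]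
      have hlt : n / k < n := by nlinarith
      have hNat := pv_toNat_mul (show (0:Int) ≤ k by omega) (by omega) heq
      obtain ⟨i1, i2, i3, i4, i5⟩ :=
        ih (n / k) k (f.insert k (f.getD k 0 + 1)) hk hn' (by omega) hkp
      refine ⟨i1, ?_, ?_, ?_, ?_⟩
      · rw [i2, hNat, Nat.ordCompl_mul, hkp.factorization_self, pow_one,
          Nat.div_self (by omega), one_mul]
      · exact fun h => i3 (PySem.Dict.nodup_keys_insert _ _ _ h)
      · intro q hq
        rcases i4 q hq with hq' | rfl
        · rcases (PySem.Dict.mem_keys_insert _ _ _ _).mp hq' with rfl | hq''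
          · exact .inr rfl
          · exact .inl hq''
        · exact .inr rfl
      · intro p
        rw [i5 p]
        by_cases hpk : p = k
        · subst hpk
          by_cases hd' : p ∣ n / p
          · rw [if_pos ⟨rfl, hd'⟩, if_pos ⟨rfl, hd⟩, PySem.Dict.getD_insert, if_pos rfl,
              pv_fz_step hk hkp hn' heq]
            congr 1; ring
          · rw [if_neg (by simp [hd']), if_pos ⟨rfl, hd⟩, PySem.Dict.get?_insert, if_pos rfl,
              pv_fz_step hk hkp hn' heq,
              pv_fz_zero_of_not_dvd (by omega) (by omega) hd']
            norm_num
        · rw [if_neg (by simp [hpk]), if_neg (by simp [hpk]),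
            PySem.Dict.get?_insert, if_neg hpk]
    · rw [if_neg (by simp [PySem.Int.mod_eq_zero_iff_dvd, hd])]
      have hfz : n.toNat.factorization k.toNat = 0 :=
        Nat.factorization_eq_zero_of_not_dvd
          (by rw [← pv_dvd_toNat (show (0:Int) ≤ k by omega) (by omega)]; exact hd)
      refine ⟨hn, by simp [hfz], fun h => h, fun q hq => .inl hq, fun p => ?_⟩
      rw [if_neg (by simp [hd])]

theorem pv_divLoopB_not_dvd {n k : Int} (f : PySem.Dict Int Int) (hd : ¬ k ∣ n) :
    ∀ fuel : Nat, pvDivLoopB fuel n k f = (n, f) := by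
  intro fuel
  cases fuel with
  | zero => rfl
  | succ fuel => rw [pvDivLoopB, if_neg (by simp [PySem.Int.mod_eq_zero_iff_dvd, hd])]

theorem pv_charB : ∀ (fuel : Nat) (n k : Int) (f : PySem.Dict Int Int),
    2 ≤ k → 1 ≤ n → (n + 1 - k).toNat ≤ fuel →
    (∀ j : Int, 2 ≤ j → j < k → ¬ j ∣ n) →
    (∀ q ∈ f.keys, 2 ≤ q ∧ q < k) → f.keys.Nodup →
    pvGoodDict n f (pvTrailB (pvFactB fuel n k f)) := by
  intro fuel
  induction fuel with
  | zero =>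
    intro n k f hk hn hf inv hkeys hnd
    rw [pvFactB]
    exact pv_char_base hk hn (by nlinarith [show n + 1 ≤ k by omega]) inv
      (fun q hq => ⟨(hkeys q hq).1, le_of_lt (hkeys q hq).2⟩) hnd
  | succ fuel ih =>
    intro n k f hk hn hf inv hkeys hnd
    rw [pvFactB]
    by_cases hguard : k * k ≤ n
    swap
    · rw [if_neg hguard]
      exact pv_char_base hk hn (by omega) inv
        (fun q hq => ⟨(hkeys q hq).1, le_of_lt (hkeys q hq).2⟩) hnd
    rw [if_pos hguard]
    have hkn : k ≤ n := by nlinarith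
    by_cases hd : k ∣ n
    · -- k is the least prime factor of n; the inner loop strips it completely
      have hkp : k.toNat.Prime := pv_S2 hk hn hd inv
      obtain ⟨i1, i2, i3, i4, i5⟩ := pv_charDivB n.toNat n k f hk hn le_rfl hkp
      set r := pvDivLoopB n.toNat n k f with hr
      have hn0 : n.toNat ≠ 0 := by omega
      have hr1dvdN : r.1.toNat ∣ n.toNat := by rw [i2]; exact Nat.ordCompl_dvd _ _
      have hr1dvd : r.1 ∣ n := by
        rw [pv_dvd_toNat (by omega) (by omega)]; exact hr1dvdN
      have hr1le : r.1 ≤ n := Int.le_of_dvd (by omega) hr1dvd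
      have hknr : ¬ k ∣ r.1 := by
        rw [pv_dvd_toNat (by omega) (by omega), i2]
        exact Nat.not_dvd_ordCompl hkp hn0
      have hfzr : ∀ p : Int, p ≠ k → 2 ≤ p → pvFz r.1 p = pvFz n p := by
        intro p hpk hp2
        simp only [pvFz, i2, Nat.factorization_ordCompl]
        rw [Finsupp.erase_ne (show p.toNat ≠ k.toNat by omega)]
      have hdvdr : ∀ p : Int, p ≠ k → 2 ≤ p → p.toNat.Prime → (p ∣ r.1 ↔ p ∣ n) := by
        intro p hpk hp2 hpp
        rw [pv_fz_pos_iff i1 hp2 hpp, pv_fz_pos_iff hn hp2 hpp, hfzr p hpk hp2]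
      have hgk : r.2.get? k = some (f.getD k 0 + pvFz n k) := by
        rw [i5 k, if_pos ⟨rfl, hd⟩]
      obtain ⟨j1, j2⟩ := ih r.1 (k+1) r.2 (by omega) i1 (by omega)
        (by
          intro j hj2 hjk hjd
          rcases lt_or_eq_of_le (show j ≤ k by omega) with hlt | rfl
          · exact inv j hj2 hlt (hjd.trans hr1dvd)
          · exact hknr hjd)
        (by
          intro q hq
          rcases i4 q hq with hq' | rfl
          · exact ⟨(hkeys q hq').1, by have := (hkeys q hq').2; omega⟩
          · exact ⟨hk, by omega⟩)
        (i3 hnd)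
      refine ⟨j1, ?_⟩
      intro p
      rw [j2 p]
      by_cases hpk : p = k
      · subst hpk
        rw [if_pos (.inl (pv_mem_keys_iff_get?.mpr (by rw [hgk]; simp))),
          if_pos (.inr ⟨hk, hkp, hd⟩),
          PySem.Dict.getD_eq_get?_getD, hgk,
          pv_fz_zero_of_not_dvd (by omega) (by omega) hknr]
        norm_num
      · have hg : r.2.get? p = f.get? p := by rw [i5 p, if_neg (by simp [hpk])]
        have hmemiff : p ∈ r.2.keys ↔ p ∈ f.keys := by
          rw [pv_mem_keys_iff_get?, pv_mem_keys_iff_get?, hg]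
        have hgD : r.2.getD p 0 = f.getD p 0 := by
          rw [PySem.Dict.getD_eq_get?_getD, PySem.Dict.getD_eq_get?_getD, hg]
        by_cases hcond : p ∈ f.keys ∨ (2 ≤ p ∧ p.toNat.Prime ∧ p ∣ n)
        · have hp2 : 2 ≤ p := by
            rcases hcond with hmem | ⟨hp2, -, -⟩
            · exact (hkeys p hmem).1
            · exact hp2
          rw [if_pos (by
              rcases hcond with hmem | ⟨hp2', hpp, hpd⟩
              · exact .inl (hmemiff.mpr hmem)
              · exact .inr ⟨hp2', hpp, (hdvdr p hpk hp2' hpp).mpr hpd⟩),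
            if_pos hcond, hgD, hfzr p hpk hp2]
        · rw [if_neg (by
              rintro (hmem | ⟨hp2', hpp, hpd⟩)
              · exact hcond (.inl (hmemiff.mp hmem))
              · exact hcond (.inr ⟨hp2', hpp, hpd.trans hr1dvd⟩)),
            if_neg hcond]
    · -- k does not divide n: the inner loop is a no-op and k moves on
      rw [pv_divLoopB_not_dvd f hd]
      exact ih n (k+1) f (by omega) hn (by omega)
        (by
          intro j hj2 hjk
          rcases lt_or_eq_of_le (show j ≤ k by omega) with hlt | rfl
          · exact inv j hj2 hlt
          · exact hd)
        (fun q hq => ⟨(hkeys q hq).1, by have := (hkeys q hq).2; omega⟩) hnd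

-- the finished dicts of both programs answer lookups by "prime dividing num ↦ its exponent"
def pvCanon (n : Int) (d : PySem.Dict Int Int) : Prop :=
  d.keys.Nodup ∧ ∀ p : Int, d.get? p =
    if 2 ≤ p ∧ p.toNat.Prime ∧ p ∣ n then some (pvFz n p) else none

theorem pv_goodDict_empty_canon {n : Int} {d : PySem.Dict Int Int}
    (h : pvGoodDict n PySem.Dict.empty d) : pvCanon n d := by
  refine ⟨h.1, fun p => ?_⟩
  have := h.2 p
  simpa [PySem.Dict.keys_empty, PySem.Dict.getD_empty] using this

theorem pv_FA {m : Int} (hm : 2 ≤ m) : pvCanon m (factorizeA m) := by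
  rw [factorizeA, if_neg (by simp; omega)]
  refine pv_goodDict_empty_canon (pv_charA (pvFuelA m 2) m 2 PySem.Dict.empty
    (le_refl 2) (by omega) le_rfl (fun j hj2 hjk => by omega) ?_ ?_)
  · simp [PySem.Dict.keys_empty]
  · simp [PySem.Dict.keys_empty]

theorem pv_FB {m : Int} (hm : 2 ≤ m) :
    pvCanon m (pvTrailB (pvFactB (m + 1 - 2).toNat m 2 PySem.Dict.empty)) := by
  refine pv_goodDict_empty_canon (pv_charB ((m + 1 - 2).toNat) m 2 PySem.Dict.empty
    (le_refl 2) (by omega) le_rfl (fun j hj2 hjk => by omega) ?_ ?_)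
  · simp [PySem.Dict.keys_empty]
  · simp [PySem.Dict.keys_empty]

-- ============ consequences of pvCanon ============

theorem pv_canon_mem_items {n : Int} {d : PySem.Dict Int Int} (h : pvCanon n d)
    {p e : Int} : (p, e) ∈ d.items ↔ (2 ≤ p ∧ p.toNat.Prime ∧ p ∣ n ∧ e = pvFz n p) := by
  rw [← PySem.Dict.get?_eq_some_iff_mem_items _ _ _ h.1, h.2 p]
  by_cases hc : 2 ≤ p ∧ p.toNat.Prime ∧ p ∣ n
  · rw [if_pos hc]
    constructor
    · intro hs; cases hs; exact ⟨hc.1, hc.2.1, hc.2.2, rfl⟩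
    · rintro ⟨-, -, -, rfl⟩; rfl
  · rw [if_neg hc]
    constructor
    · intro hs; cases hs
    · rintro ⟨h1, h2, h3, -⟩; exact absurd ⟨h1, h2, h3⟩ hc

theorem pv_canon_mem_keys {n : Int} {d : PySem.Dict Int Int} (h : pvCanon n d)
    {p : Int} : p ∈ d.keys ↔ (2 ≤ p ∧ p.toNat.Prime ∧ p ∣ n) := by
  rw [pv_mem_keys_iff_get?, h.2 p]
  by_cases hc : 2 ≤ p ∧ p.toNat.Prime ∧ p ∣ n
  · simp [hc]
  · simp [hc]

theorem pv_canon_items_ne_nil {n : Int} {d : PySem.Dict Int Int} (h : pvCanon n d)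
    (hn : 2 ≤ n) : d.items ≠ [] := by
  have hpp : n.toNat.minFac.Prime := Nat.minFac_prime (by omega)
  have hpd : (n.toNat.minFac : Int) ∣ n := by
    rw [pv_dvd_toNat (by positivity) (by omega)]
    simpa using Nat.minFac_dvd n.toNat
  have hmem : (n.toNat.minFac : Int) ∈ d.keys :=
    (pv_canon_mem_keys h).mpr ⟨by exact_mod_cast hpp.two_le, by simpa using hpp, hpd⟩
  intro h0
  rw [show d.keys = d.items.map (·.1) from rfl, h0] at hmem
  simp at hmem

theorem pv_find?_congr {α : Type} {p q : α → Bool} : ∀ l : List α,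
    (∀ x ∈ l, p x = q x) → l.find? p = l.find? q := by
  intro l
  induction l with
  | nil => simp
  | cons x t ih =>
    intro h
    rw [List.find?_cons, List.find?_cons, h x List.mem_cons_self,
      ih (fun y hy => h y (List.mem_cons_of_mem _ hy))]

-- ============ the check loops ============

theorem pv_checkA_cons_some {i p e m : Int} {nd : PySem.Dict Int Int} {rest : List (Int × Int)}
    {b : Bool} (h : nd.get? p = some m) :
    pvCheckA i nd ((p, e) :: rest) b = if m * i ≥ e then pvCheckA i nd rest true else false := by
  rw [pvCheckA, h]

theorem pv_checkA_cons_none {i p e : Int} {nd : PySem.Dict Int Int} {rest : List (Int × Int)}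
    {b : Bool} (h : nd.get? p = none) :
    pvCheckA i nd ((p, e) :: rest) b = false := by
  rw [pvCheckA, h]

theorem pv_checkA_true (i : Int) (nd : PySem.Dict Int Int) : ∀ l : List (Int × Int),
    pvCheckA i nd l true = true ↔
      ∀ pe ∈ l, ∃ m : Int, nd.get? pe.1 = some m ∧ m * i ≥ pe.2 := by
  intro l
  induction l with
  | nil => simp [pvCheckA]
  | cons pe rest ih =>
    obtain ⟨p, e⟩ := pe
    cases h : nd.get? p with
    | none =>
      rw [pv_checkA_cons_none h]
      simp only [Bool.false_eq_true, false_iff, List.forall_mem_cons]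
      rintro ⟨⟨m', hm', -⟩, -⟩
      rw [h] at hm'; cases hm'
    | some m =>
      rw [pv_checkA_cons_some h]
      by_cases hge : m * i ≥ e
      · rw [if_pos (by exact hge), ih]
        simp only [List.forall_mem_cons]
        exact ⟨fun hr => ⟨⟨m, h, hge⟩, hr⟩, fun hr => hr.2⟩
      · rw [if_neg (by exact hge)]
        simp only [Bool.false_eq_true, false_iff, List.forall_mem_cons]
        rintro ⟨⟨m', hm', hge'⟩, -⟩
        rw [h] at hm'; cases hm'; exact absurd hge' hge

theorem pv_checkA_false (i : Int) (nd : PySem.Dict Int Int) : ∀ l : List (Int × Int),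
    pvCheckA i nd l false = true ↔
      (l ≠ [] ∧ ∀ pe ∈ l, ∃ m : Int, nd.get? pe.1 = some m ∧ m * i ≥ pe.2) := by
  intro l
  cases l with
  | nil => simp [pvCheckA]
  | cons pe rest =>
    obtain ⟨p, e⟩ := pe
    cases h : nd.get? p with
    | none =>
      rw [pv_checkA_cons_none h]
      simp only [Bool.false_eq_true, false_iff, List.forall_mem_cons]
      rintro ⟨-, ⟨m', hm', -⟩, -⟩
      rw [h] at hm'; cases hm'
    | some m =>
      rw [pv_checkA_cons_some h]
      by_cases hge : m * i ≥ e
      · rw [if_pos (by exact hge), pv_checkA_true]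
        simp only [List.forall_mem_cons]
        exact ⟨fun hr => ⟨by simp, ⟨m, h, hge⟩, hr⟩, fun hr => hr.2.2⟩
      · rw [if_neg (by exact hge)]
        simp only [Bool.false_eq_true, false_iff, List.forall_mem_cons]
        rintro ⟨-, ⟨m', hm', hge'⟩, -⟩
        rw [h] at hm'; cases hm'; exact absurd hge' hge

theorem pv_checkB_iff (i : Int) : ∀ l : List (Int × Int),
    pvCheckB i l = true ↔ ∀ pe ∈ l, pvValB i.toNat i pe.1 * i ≥ pe.2 := by
  intro l
  induction l with
  | nil => simp [pvCheckB]
  | cons pe rest ih =>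
    obtain ⟨p, e⟩ := pe
    rw [pvCheckB]
    by_cases hlt : pvValB i.toNat i p * i < e
    · rw [if_pos (by exact hlt)]
      simp only [Bool.false_eq_true, false_iff, List.forall_mem_cons]
      rintro ⟨hc, -⟩; omega
    · rw [if_neg (by exact hlt), ih]
      simp only [List.forall_mem_cons]
      exact ⟨fun hr => ⟨by omega, hr⟩, fun hr => hr.2⟩

-- ============ the search loops are find? ============

theorem pv_pyRange_pos_cons {a b s : Int} (h0 : 0 < s) (h : a < b) :
    PySem.List.pyRange a b s = a :: PySem.List.pyRange (a + s) b s := by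
  rw [PySem.List.pyRange_of_pos _ _ h0, PySem.List.pyRange_of_pos _ _ h0]
  by_cases h2 : a + s < b
  · rw [if_pos h, if_pos h2]
    have hN : ((b - a + s - 1) / s).toNat = ((b - (a+s) + s - 1) / s).toNat + 1 := by
      have he : b - a + s - 1 = (b - (a+s) + s - 1) + 1 * s := by ring
      rw [he, Int.add_mul_ediv_right _ _ (by omega)]
      have hpos : 0 ≤ (b - (a+s) + s - 1) / s := Int.ediv_nonneg (by omega) (by omega)
      omega
    rw [hN, List.range_succ_eq_map, List.map_cons, List.map_map]
    refine congrArg₂ _ (by simp) ?_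
    apply List.map_congr_left
    intro k _
    simp [Function.comp, Nat.succ_eq_add_one]
    ring
  · rw [if_pos h, if_neg h2]
    have hN : ((b - a + s - 1) / s).toNat = 1 := by
      have h1 : 1 ≤ (b - a + s - 1) / s := by
        rw [Int.le_ediv_iff_mul_le (by omega)]; omega
      have h2' : (b - a + s - 1) / s < 2 := by
        rw [Int.ediv_lt_iff_lt_mul (by omega)]; omega
      omega
    rw [hN]
    simp

theorem pv_pyRange_pos_nil {a b s : Int} (h0 : 0 < s) (h : b ≤ a) :
    PySem.List.pyRange a b s = [] := by
  rw [PySem.List.pyRange_of_pos _ _ h0, if_neg (by omega)]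
  simp

theorem pv_searchA_eq (ad : PySem.Dict Int Int) : ∀ (fuel : Nat) (start stop : Int),
    (stop - start).toNat ≤ fuel →
    pvSearchA ad fuel start stop =
      (((PySem.List.pyRange start stop 1).find?
        (fun i => pvCheckA i (factorizeA i) ad.items false)).getD 0) := by
  intro fuel
  induction fuel with
  | zero =>
    intro start stop hf
    rw [pvSearchA, PySem.List.pyRange_one_eq_nil (by omega)]
    simp
  | succ fuel ih =>
    intro start stop hf
    rw [pvSearchA]
    by_cases hlt : start < stop
    · rw [if_pos hlt, PySem.List.pyRange_one_cons hlt, List.find?_cons]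
      by_cases h : pvCheckA start (factorizeA start) ad.items false = true
      · simp [h]
      · simp only [h, if_false, Bool.false_eq_true]
        rw [ih (start + 1) stop (by omega)]
    · rw [if_neg hlt, PySem.List.pyRange_one_eq_nil (by omega)]
      simp

theorem pv_searchB_eq (its : List (Int × Int)) {R : Int} (h0 : 0 < R) :
    ∀ (fuel : Nat) (start stop : Int), (stop - start).toNat ≤ fuel →
    pvSearchB its R fuel start stop =
      (((PySem.List.pyRange start stop R).find? (fun i => pvCheckB i its)).getD 0) := by
  intro fuel
  induction fuel with
  | zero =>
    intro start stop hf
    rw [pvSearchB, pv_pyRange_pos_nil h0 (by omega)]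
    simp
  | succ fuel ih =>
    intro start stop hf
    rw [pvSearchB]
    by_cases hlt : start < stop
    · rw [if_pos hlt, pv_pyRange_pos_cons h0 hlt, List.find?_cons]
      by_cases h : pvCheckB start its = true
      · simp [h]
      · simp only [h, if_false, Bool.false_eq_true]
        rw [ih (start + R) stop (by omega)]
    · rw [if_neg hlt, pv_pyRange_pos_nil h0 (by omega)]
      simp

-- ============ the radical ============

theorem pv_foldl_mul_eq_prod (l : List Int) : l.foldl (fun acc q => acc * q) 1 = l.prod :=
  (List.prod_eq_foldl).symm

theorem pv_radical_dvd {l : List Int} {p : Int} (hp : p ∈ l) :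
    p ∣ l.foldl (fun acc q => acc * q) 1 := by
  rw [pv_foldl_mul_eq_prod]; exact List.dvd_prod hp

theorem pv_radical_two_le {l : List Int} (hne : l ≠ []) (h : ∀ q ∈ l, 2 ≤ q) :
    2 ≤ l.foldl (fun acc q => acc * q) 1 := by
  rw [pv_foldl_mul_eq_prod]
  cases l with
  | nil => exact absurd rfl hne
  | cons q t =>
    rw [List.prod_cons]
    have h1 : 1 ≤ t.prod := List.one_le_prod (fun x hx => by have := h x (List.mem_cons_of_mem _ hx); omega)
    have h2 : 2 ≤ q := h q (List.mem_cons_self)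
    nlinarith

theorem pv_coprime_prod {q : Nat} (hq : q.Prime) : ∀ t : List Nat, (∀ p ∈ t, p.Prime) →
    q ∉ t → q.Coprime t.prod := by
  intro t
  induction t with
  | nil => simp
  | cons r s ih =>
    intro hp hq'
    rw [List.prod_cons]
    refine Nat.Coprime.mul_right ?_ ?_
    · exact (Nat.coprime_primes hq (hp r List.mem_cons_self)).mpr
        (fun h => hq' (h ▸ List.mem_cons_self))
    · exact ih (fun p hp' => hp p (List.mem_cons_of_mem _ hp'))
        (fun h => hq' (List.mem_cons_of_mem _ h))

theorem pv_nat_primes_prod_dvd {m : Nat} : ∀ l : List Nat, l.Nodup → (∀ p ∈ l, p.Prime) →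
    (∀ p ∈ l, p ∣ m) → l.prod ∣ m := by
  intro l
  induction l with
  | nil => simp
  | cons q t ih =>
    intro hnd hp hd
    rw [List.prod_cons]
    refine (pv_coprime_prod (hp q List.mem_cons_self) t
      (fun p hp' => hp p (List.mem_cons_of_mem _ hp'))
      (List.nodup_cons.mp hnd).1).mul_dvd_of_dvd_of_dvd (hd q List.mem_cons_self)
      (ih (List.nodup_cons.mp hnd).2 (fun p hp' => hp p (List.mem_cons_of_mem _ hp'))
        (fun p hp' => hd p (List.mem_cons_of_mem _ hp')))

theorem pv_prod_toNat : ∀ l : List Int, (∀ q ∈ l, 0 ≤ q) →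
    l.prod = ((l.map Int.toNat).prod : Nat) := by
  intro l
  induction l with
  | nil => simp
  | cons q t ih =>
    intro h
    rw [List.prod_cons, List.map_cons, List.prod_cons, ih (fun x hx => h x (List.mem_cons_of_mem _ hx))]
    push_cast [Int.toNat_of_nonneg (h q (List.mem_cons_self))]
    ring

theorem pv_radical_dvd_of_forall {l : List Int} {i : Int} (hnd : l.Nodup)
    (hp : ∀ q ∈ l, 2 ≤ q ∧ q.toNat.Prime) (hdvd : ∀ q ∈ l, q ∣ i) (hi : 0 ≤ i) :
    l.foldl (fun acc q => acc * q) 1 ∣ i := by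
  rw [pv_foldl_mul_eq_prod, pv_prod_toNat l (fun q hq => by have := (hp q hq).1; omega)]
  rw [pv_dvd_toNat (by positivity) hi]
  simp only [Int.toNat_natCast]
  refine pv_nat_primes_prod_dvd (l.map Int.toNat) ?_ ?_ ?_
  · refine hnd.map_on ?_
    intro x hx y hy hxy
    have hax := (hp x hx).1; have hay := (hp y hy).1
    omega
  · rintro p hp'
    rw [List.mem_map] at hp'
    obtain ⟨q, hq, rfl⟩ := hp'
    exact (hp q hq).2
  · rintro p hp'
    rw [List.mem_map] at hp'
    obtain ⟨q, hq, rfl⟩ := hp'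
    rw [← pv_dvd_toNat (by have := (hp q hq).1; omega) hi]
    exact hdvd q hq

-- ============ per-candidate equivalence and range filtering ============

theorem pv_filter_range {R bnd : Int} (hR : 2 ≤ R) :
    (PySem.List.pyRange 1 bnd 1).filter (fun i => decide (R ∣ i)) =
      PySem.List.pyRange R bnd R := by
  have h0 : (0:Int) < R := by omega
  have pairL : ((PySem.List.pyRange 1 bnd 1).filter (fun i => decide (R ∣ i))).Pairwise (· < ·) :=
    (PySem.List.pairwise_lt_pyRange_one 1 bnd).filter _
  have pairR : (PySem.List.pyRange R bnd R).Pairwise (· < ·) := by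
    rw [PySem.List.pyRange_of_pos _ _ h0]
    rw [List.pairwise_map]
    exact List.pairwise_lt_range.imp (fun {a b} hab => by
      have : (a:Int) < b := by exact_mod_cast hab
      nlinarith)
  have nodL : ((PySem.List.pyRange 1 bnd 1).filter (fun i => decide (R ∣ i))).Nodup :=
    (PySem.List.nodup_pyRange_one 1 bnd).filter _
  have nodR : (PySem.List.pyRange R bnd R).Nodup :=
    pairR.imp (fun hab => ne_of_lt hab)
  have hmem : ∀ x : Int, x ∈ PySem.List.pyRange R bnd R ↔
      x ∈ (PySem.List.pyRange 1 bnd 1).filter (fun i => decide (R ∣ i)) := by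
    intro x
    rw [PySem.List.mem_pyRange_iff_of_pos h0, List.mem_filter,
      PySem.List.mem_pyRange_one]
    simp only [decide_eq_true_eq]
    constructor
    · rintro ⟨h1, h2, h3⟩
      have : R ∣ x := by
        have := dvd_add h3 (dvd_refl R)
        simpa using this
      exact ⟨⟨by omega, h2⟩, this⟩
    · rintro ⟨⟨h1, h2⟩, h3⟩
      have hle : R ≤ x := Int.le_of_dvd (by omega) h3
      exact ⟨hle, h2, dvd_sub h3 (dvd_refl R)⟩
  have hperm : (PySem.List.pyRange R bnd R).Perm
      ((PySem.List.pyRange 1 bnd 1).filter (fun i => decide (R ∣ i))) :=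
    (List.perm_ext_iff_of_nodup nodR nodL).mpr hmem
  calc (PySem.List.pyRange 1 bnd 1).filter (fun i => decide (R ∣ i))
      = PySem.List.sorted ((PySem.List.pyRange 1 bnd 1).filter (fun i => decide (R ∣ i)))
          (fun x => x) :=
        (PySem.List.sorted_eq_self_of_pairwise _ _ (pairL.imp fun hab => le_of_lt hab)).symm
    _ = PySem.List.pyRange R bnd R :=
        PySem.List.sorted_eq_of_perm_of_pairwise_lt _ _ _ hperm pairR

theorem pv_factorizeA_one : factorizeA 1 = PySem.Dict.empty.insert 1 1 := by
  rw [factorizeA]; rfl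

-- a candidate i passes A's check iff it is a multiple of the radical and passes B's check
theorem pv_per_i {num i : Int} (hm : 2 ≤ num) (hi : 1 ≤ i)
    {dA dB : PySem.Dict Int Int} (hA : pvCanon num dA) (hB : pvCanon num dB) :
    pvCheckA i (factorizeA i) dA.items false = true ↔
      (dB.keys.foldl (fun acc p => acc * p) 1 ∣ i ∧ pvCheckB i dB.items = true) := by
  have hkeysne : dB.keys ≠ [] := by
    intro h0
    exact pv_canon_items_ne_nil hB hm
      (List.map_eq_nil_iff.mp (by rw [show dB.keys = dB.items.map (·.1) from rfl] at h0; exact h0))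
  have hR2 : 2 ≤ dB.keys.foldl (fun acc p => acc * p) 1 :=
    pv_radical_two_le hkeysne (fun q hq => ((pv_canon_mem_keys hB).mp hq).1)
  rw [pv_checkA_false, pv_checkB_iff]
  constructor
  · rintro ⟨hne, hall⟩
    have hi2 : 2 ≤ i := by
      by_contra hlt
      have hi1 : i = 1 := by omega
      subst hi1
      have hpp : num.toNat.minFac.Prime := Nat.minFac_prime (by omega)
      have hpd : (num.toNat.minFac : Int) ∣ num := by
        rw [pv_dvd_toNat (by positivity) (by omega)]
        simpa using Nat.minFac_dvd num.toNat
      have hmemA : ((num.toNat.minFac : Int), pvFz num num.toNat.minFac) ∈ dA.items :=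
        (pv_canon_mem_items hA).mpr ⟨by exact_mod_cast hpp.two_le, by simpa using hpp, hpd, rfl⟩
      obtain ⟨m, hget, -⟩ := hall _ hmemA
      rw [pv_factorizeA_one, PySem.Dict.get?_insert,
        if_neg (by have := hpp.two_le; omega), PySem.Dict.get?_empty] at hget
      cases hget
    have hCi := pv_FA hi2
    have hAget : ∀ p : Int, 2 ≤ p → p.toNat.Prime → p ∣ num →
        p ∣ i ∧ pvFz i p * i ≥ pvFz num p := by
      intro p hp2 hpp hpd
      obtain ⟨m, hget, hge⟩ :=
        hall (p, pvFz num p) ((pv_canon_mem_items hA).mpr ⟨hp2, hpp, hpd, rfl⟩)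
      rw [hCi.2 p] at hget
      by_cases hc : 2 ≤ p ∧ p.toNat.Prime ∧ p ∣ i
      · rw [if_pos hc] at hget; cases hget; exact ⟨hc.2.2, hge⟩
      · rw [if_neg hc] at hget; cases hget
    refine ⟨?_, ?_⟩
    · refine pv_radical_dvd_of_forall hB.1
        (fun q hq => ⟨((pv_canon_mem_keys hB).mp hq).1, ((pv_canon_mem_keys hB).mp hq).2.1⟩)
        ?_ (by omega)
      intro q hq
      obtain ⟨hq2, hqp, hqd⟩ := (pv_canon_mem_keys hB).mp hq
      exact (hAget q hq2 hqp hqd).1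
    · rintro ⟨p, e⟩ hpe
      obtain ⟨hp2, hpp, hpd, he⟩ := (pv_canon_mem_items hB).mp hpe
      rw [pv_val_eq_fz i.toNat i p (by omega) hp2 le_rfl hpp]
      subst he
      exact (hAget p hp2 hpp hpd).2
  · rintro ⟨hRd, hQ⟩
    have hi2 : 2 ≤ i := by
      have := Int.le_of_dvd (by omega) hRd; omega
    have hCi := pv_FA hi2
    refine ⟨pv_canon_items_ne_nil hA hm, ?_⟩
    rintro ⟨p, e⟩ hpe
    obtain ⟨hp2, hpp, hpd, he⟩ := (pv_canon_mem_items hA).mp hpe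
    have hpR : p ∣ dB.keys.foldl (fun acc p => acc * p) 1 :=
      pv_radical_dvd ((pv_canon_mem_keys hB).mpr ⟨hp2, hpp, hpd⟩)
    have hpi : p ∣ i := hpR.trans hRd
    refine ⟨pvFz i p, by rw [hCi.2 p, if_pos ⟨hp2, hpp, hpi⟩], ?_⟩
    have hq := hQ (p, pvFz num p) ((pv_canon_mem_items hB).mpr ⟨hp2, hpp, hpd, rfl⟩)
    rw [pv_val_eq_fz i.toNat i p (by omega) hp2 le_rfl hpp] at hq
    subst he
    exact hq

-- ===== VERDICT (by name: the statement is the Claim_ definition above) =====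
theorem min_divisor_spec : Claim_equal_min_divisor := by
  intro num hdom hpre
  show min_divisor num = min_divisor_alt num
  by_cases h1 : num = 1
  · subst h1; decide
  · have hm : 2 ≤ num := by
      have := hpre; unfold Pre_min_divisor at this; omega
    have hA := pv_FA hm
    have hB := pv_FB hm
    rw [min_divisor, min_divisor_alt, if_neg (by simp [h1])]
    show pvSearchA (factorizeA num) (num + 1).toNat 1 (num + 1) =
      pvSearchB (pvTrailB (pvFactB (num + 1 - 2).toNat num 2 PySem.Dict.empty)).items
        ((pvTrailB (pvFactB (num + 1 - 2).toNat num 2 PySem.Dict.empty)).keys.foldl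
          (fun acc p => acc * p) 1)
        (num + 1).toNat
        ((pvTrailB (pvFactB (num + 1 - 2).toNat num 2 PySem.Dict.empty)).keys.foldl
          (fun acc p => acc * p) 1)
        (num + 1)
    set dB := pvTrailB (pvFactB (num + 1 - 2).toNat num 2 PySem.Dict.empty) with hdB
    set R := dB.keys.foldl (fun acc p => acc * p) 1 with hR
    have hkeysne : dB.keys ≠ [] := by
      intro h0
      exact pv_canon_items_ne_nil hB hm
        (List.map_eq_nil_iff.mp (by rw [show dB.keys = dB.items.map (·.1) from rfl] at h0; exact h0))
    have hR2 : 2 ≤ R :=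
      pv_radical_two_le hkeysne (fun q hq => ((pv_canon_mem_keys hB).mp hq).1)
    rw [pv_searchA_eq (factorizeA num) (num + 1).toNat 1 (num + 1) (by omega),
      pv_searchB_eq dB.items (by omega) (num + 1).toNat R (num + 1) (by omega)]
    have hfind : (PySem.List.pyRange 1 (num + 1) 1).find?
          (fun i => pvCheckA i (factorizeA i) (factorizeA num).items false) =
        (PySem.List.pyRange R (num + 1) R).find? (fun i => pvCheckB i dB.items) := by
      rw [← pv_filter_range hR2 (bnd := num + 1), List.find?_filter]
      apply pv_find?_congr
      intro x hx
      have hx1 : 1 ≤ x := (PySem.List.mem_pyRange_one.mp hx).1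
      have hiff := pv_per_i hm hx1 hA hB
      rw [← hR] at hiff
      by_cases hc : pvCheckA x (factorizeA x) (factorizeA num).items false = true
      · rw [hc]
        obtain ⟨hd, hb⟩ := hiff.mp hc
        symm
        simp [hd, hb]
      · rw [Bool.not_eq_true] at hc
        rw [hc]
        symm
        simp only [Bool.eq_false_iff, ne_eq, decide_eq_true_eq]
        rintro ⟨hd, hb⟩
        rw [hiff.mpr ⟨by simpa using hd, hb⟩] at hc
        cases hc
    rw [hfind]
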